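-- pv_equiv track=rewrite | github.com/pepe5p/regex-finder | src/common_groups.py | find_common_groups
-- ===== SOURCE A (Python) =====
-- from typing import Generator
--
-- def find_common_groups(sentences: list[str]) -> list[str]:
--     if not sentences:
--         return []
--
--     shortest_sentence = min(sentences, key=len)
--     shortest_sentence_length = len(shortest_sentence)
--
--     common_groups: list[str] = []
--
--     i = 0
--     while i < shortest_sentence_length:
--         for substring in generate_substrings(string=shortest_sentence, start=i):
--             if matches_all_sentences(substring=substring, sentences=sentences):
--                 common_groups.append(substring)
--                 i += len(substring)
--                 break
--         else:
--             i += 1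
--
--     return common_groups
--
-- def generate_substrings(string: str, start: int) -> Generator[str, None, None]:
--     sentence_length = len(string)
--     for end in range(sentence_length, start, -1):
--         yield string[start:end]
--
-- def matches_all_sentences(substring: str, sentences: list[str]) -> bool:
--     return all(substring in sentence for sentence in sentences)
-- ===== SOURCE B (Python) =====
-- def find_common_groups(sentences: list[str]) -> list[str]:
--     if not sentences:
--         return []
--
--     shortest = min(sentences, key=len)
--     n = len(shortest)
--
--     groups: list[str] = []
--     i = 0
--     while i < n:
--         # binary search the largest L in [1, n - i] with shortest[i:i+L] in
--         # every sentence (0 if none), using monotonicity of the property in L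
--         lo, hi = 0, n - i
--         while lo < hi:
--             mid = (lo + hi + 1) // 2
--             if all(shortest[i:i + mid] in t for t in sentences):
--                 lo = mid
--             else:
--                 hi = mid - 1
--         if lo > 0:
--             groups.append(shortest[i:i + lo])
--             i += lo
--         else:
--             i += 1
--     return groups
-- ===== Notes on version B (the rewrite author's own statement) =====
-- stated objective: alternative
-- what changed: Per start position, A linearly tries every end from the longest substring down until one occurs in all sentences; B instead binary-searches the maximal matching length, exploiting that 'substring occurs in all sentences' is monotone in the length.
import Mathlib
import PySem

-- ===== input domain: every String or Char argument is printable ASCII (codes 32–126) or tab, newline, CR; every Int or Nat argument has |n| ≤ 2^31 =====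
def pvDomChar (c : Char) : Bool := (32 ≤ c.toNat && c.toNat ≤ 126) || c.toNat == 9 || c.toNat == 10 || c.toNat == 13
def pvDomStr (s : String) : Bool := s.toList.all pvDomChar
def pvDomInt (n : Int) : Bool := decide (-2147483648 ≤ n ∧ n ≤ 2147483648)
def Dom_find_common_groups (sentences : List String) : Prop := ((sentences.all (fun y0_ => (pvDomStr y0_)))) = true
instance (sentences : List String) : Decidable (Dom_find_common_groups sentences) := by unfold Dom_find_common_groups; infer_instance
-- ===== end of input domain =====

-- B replaces A's per-start linear scan over ever-shorter substrings by a per-start binary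
-- search on the substring length (valid by monotonicity of "occurs in all sentences").


-- ===== PORT A =====
-- matches_all_sentences(substring, sentences)
def matches_all_sentences (substring : String) (sentences : List String) : Bool :=
  sentences.all (fun t => PySem.Str.isIn substring t)

-- the 'for substring in generate_substrings(...): if matches: break / else:' loop:
-- first end in range(len, start, -1) whose substring matches all sentences
def loopA (s : String) (sentences : List String) (n : Nat) (i : Nat) (fuel : Nat) : List String :=
  match fuel with
  | 0 => []
  | fuel + 1 =>
    if i < n then
      match (PySem.List.pyRange (n : Int) (i : Int) (-1)).find?
          (fun e => matches_all_sentences (PySem.Str.slice s (some (i : Int)) (some e)) sentences) with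
      | some e =>
        let sub := PySem.Str.slice s (some (i : Int)) (some e)
        sub :: loopA s sentences n (i + (PySem.Str.len sub).toNat) fuel
      | none => loopA s sentences n (i + 1) fuel
    else []

def find_common_groups (sentences : List String) : List String :=
  if sentences = [] then []
  else
    match PySem.List.min? sentences (fun t => PySem.Str.len t) with
    | none => []   -- unreachable: sentences ≠ []
    | some shortest =>
      let n := (PySem.Str.len shortest).toNat
      loopA shortest sentences n 0 n

-- ===== PORT B =====
-- inner 'while lo < hi' binary search on the length of the substring starting at i
def bsearchB (s : String) (sentences : List String) (i : Nat) (lo hi : Nat) (fuel : Nat) : Nat :=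
  match fuel with
  | 0 => lo
  | fuel + 1 =>
    if lo < hi then
      let mid := (lo + hi + 1) / 2
      if (sentences.all (fun t => PySem.Str.isIn (PySem.Str.slice s (some (i : Int)) (some ((i : Int) + (mid : Int)))) t)) then
        bsearchB s sentences i mid hi fuel
      else
        bsearchB s sentences i lo (mid - 1) fuel
    else lo

def loopB (s : String) (sentences : List String) (n : Nat) (i : Nat) (fuel : Nat) : List String :=
  match fuel with
  | 0 => []
  | fuel + 1 =>
    if i < n then
      let L := bsearchB s sentences i 0 (n - i) (n - i)
      if 0 < L then
        PySem.Str.slice s (some (i : Int)) (some ((i : Int) + (L : Int))) :: loopB s sentences n (i + L) fuel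
      else loopB s sentences n (i + 1) fuel
    else []

def find_common_groups_alt (sentences : List String) : List String :=
  if sentences = [] then []
  else
    match PySem.List.min? sentences (fun t => PySem.Str.len t) with
    | none => []   -- unreachable: sentences ≠ []
    | some shortest =>
      let n := (PySem.Str.len shortest).toNat
      loopB shortest sentences n 0 n

-- ===== PRECONDITION & SPEC =====
def Spec_find_common_groups (sentences : List String) (out : List String) : Prop := out = find_common_groups_alt sentences
instance (sentences : List String) (out : List String) : Decidable (Spec_find_common_groups sentences out) := by unfold Spec_find_common_groups; infer_instance

-- ===== CLAIM (what is proved, stated in full; the proofs are below) =====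
def Claim_equal_find_common_groups : Prop := ∀ (sentences : List String), Dom_find_common_groups sentences → Spec_find_common_groups sentences (find_common_groups sentences)

-- ===== LEMMAS AND PROOFS =====

-- monotonicity: if the length-L substring at i occurs in all sentences, so does any shorter one
lemma matches_mono (s : String) (sents : List String) (i L' L : Nat) (h : L' ≤ L)
    (hm : matches_all_sentences (PySem.Str.slice s (some (i : Int)) (some ((i : Int) + (L : Int)))) sents = true) :
    matches_all_sentences (PySem.Str.slice s (some (i : Int)) (some ((i : Int) + (L' : Int)))) sents = true := by
  simp only [matches_all_sentences, List.all_eq_true] at hm ⊢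
  intro t ht
  have h1 := hm t ht
  rw [PySem.Str.isIn_iff_infix] at h1 ⊢
  refine List.IsPrefix.isInfix ?_ |>.trans h1
  simp only [PySem.Str.toList_slice, PySem.Chars.slice_eq_listSlice]
  rw [PySem.List.slice_natCast_add, PySem.List.slice_natCast_add]
  exact List.take_prefix_take_left h

-- descending find? over range(n, i, -1) is the greatest matching offset
lemma find_desc (P : Int → Bool) (i : Int) : ∀ (N : Nat),
    (PySem.List.pyRange (i + N) i (-1)).find? P =
      (if Nat.findGreatest (fun L => P (i + L) = true) N = 0 then none
       else some (i + (Nat.findGreatest (fun L => P (i + L) = true) N : Int))) := by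
  intro N
  induction N with
  | zero => simp [PySem.List.pyRange_neg_one_eq_nil]
  | succ N ih =>
    have hcons : PySem.List.pyRange (i + (N + 1 : Nat)) i (-1)
        = (i + (N + 1 : Nat)) :: PySem.List.pyRange (i + (N : Nat)) i (-1) := by
      have harg : i + ((N + 1 : Nat) : Int) - 1 = i + (N : Nat) := by push_cast; omega
      rw [PySem.List.pyRange_neg_one_cons (by push_cast; omega), harg]
    rw [hcons, List.find?_cons]
    rw [Nat.findGreatest_succ]
    push_cast
    by_cases h : P (i + ((N : Int) + 1)) = true
    · simp [h]
    · simp only [Bool.not_eq_true] at h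
      rw [h]
      simp only [Bool.false_eq_true, if_false]
      rw [ih]

-- the binary search computes the greatest matching length ≤ N
lemma bsearchB_eq (s : String) (sents : List String) (i N : Nat) :
    ∀ (fuel lo hi : Nat), hi ≤ N → lo ≤ hi → hi - lo ≤ fuel →
    (lo = 0 ∨ matches_all_sentences (PySem.Str.slice s (some (i : Int)) (some ((i : Int) + (lo : Int)))) sents = true) →
    (∀ L, hi < L → L ≤ N → ¬ (matches_all_sentences (PySem.Str.slice s (some (i : Int)) (some ((i : Int) + (L : Int)))) sents = true)) →
    bsearchB s sents i lo hi fuel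
      = Nat.findGreatest (fun L => matches_all_sentences (PySem.Str.slice s (some (i : Int)) (some ((i : Int) + (L : Int)))) sents = true) N := by
  intro fuel
  induction fuel with
  | zero =>
    intro lo hi hN hlh hf hlow hhigh
    have : lo = hi := by omega
    subst this
    simp only [bsearchB]
    rcases hlow with h0 | hQ
    · subst h0
      symm
      rw [Nat.findGreatest_eq_zero_iff]
      intro m hm hmN
      exact hhigh m hm hmN
    · symm
      rw [Nat.findGreatest_eq_iff]
      exact ⟨hN, fun _ => hQ, fun k hk hkN => hhigh k hk hkN⟩
  | succ fuel ih =>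
    intro lo hi hN hlh hf hlow hhigh
    simp only [bsearchB]
    by_cases hlt : lo < hi
    · rw [if_pos hlt]
      have hmid1 : lo < (lo + hi + 1) / 2 := by omega
      have hmid2 : (lo + hi + 1) / 2 ≤ hi := by omega
      by_cases hQ : (sents.all (fun t => PySem.Str.isIn (PySem.Str.slice s (some (i : Int)) (some ((i : Int) + (((lo + hi + 1) / 2 : Nat) : Int)))) t)) = true
      · rw [if_pos hQ]
        exact ih _ _ hN hmid2 (by omega) (Or.inr hQ) hhigh
      · rw [if_neg hQ]
        refine ih _ _ (by omega) (by omega) (by omega) hlow ?_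
        intro L hL hLN hQL
        by_cases hLe : hi < L
        · exact hhigh L hLe hLN hQL
        · exact hQ (matches_mono s sents i _ L (by omega) hQL)
    · rw [if_neg hlt]
      have : lo = hi := by omega
      subst this
      rcases hlow with h0 | hQ
      · subst h0
        symm
        rw [Nat.findGreatest_eq_zero_iff]
        exact fun m hm hmN => hhigh m hm hmN
      · symm
        rw [Nat.findGreatest_eq_iff]
        exact ⟨hN, fun _ => hQ, fun k hk hkN => hhigh k hk hkN⟩

lemma len_slice_toNat (s : String) (i g : Nat) (h : i + g ≤ s.toList.length) :
    (PySem.Str.len (PySem.Str.slice s (some (i : Int)) (some ((i : Int) + (g : Int))))).toNat = g := by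
  simp only [PySem.Str.len_eq, PySem.Str.toList_slice, PySem.Chars.slice_eq_listSlice]
  rw [PySem.List.slice_natCast_add]
  simp only [List.length_take, List.length_drop, Int.toNat_natCast]
  omega

lemma loops_eq (s : String) (sents : List String) :
    ∀ (fuel i : Nat), loopA s sents s.toList.length i fuel = loopB s sents s.toList.length i fuel := by
  intro fuel
  induction fuel with
  | zero => intro i; rfl
  | succ fuel ih =>
    intro i
    by_cases hi : i < s.toList.length
    case neg => simp only [loopA, loopB, if_neg hi]
    case pos =>
    have hcast : ((s.toList.length : Nat) : Int) = (i : Int) + ((s.toList.length - i : Nat) : Int) := by omega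
    have hfind := find_desc (fun e => matches_all_sentences (PySem.Str.slice s (some (i : Int)) (some e)) sents) (i : Int) (s.toList.length - i)
    have hbs := bsearchB_eq s sents i (s.toList.length - i) (s.toList.length - i) 0 (s.toList.length - i)
      le_rfl (Nat.zero_le _) (by omega) (Or.inl rfl) (fun L hL hLN => absurd hL (by omega))
    set g := Nat.findGreatest (fun L => matches_all_sentences (PySem.Str.slice s (some (i : Int)) (some ((i : Int) + (L : Int)))) sents = true) (s.toList.length - i) with hg
    have hgle : g ≤ s.toList.length - i := Nat.findGreatest_le _
    simp only [loopA, loopB, if_pos hi]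
    rw [hcast, hfind, hbs]
    by_cases hg0 : g = 0
    · simp only [hg0, Nat.lt_irrefl, if_false, if_pos]
      exact ih (i + 1)
    · rw [if_neg hg0, if_pos (Nat.pos_of_ne_zero hg0)]
      simp only []
      rw [len_slice_toNat s i g (by omega)]
      exact congrArg _ (ih (i + g))

-- ===== VERDICT (by name: the statement is the Claim_ definition above) =====
theorem find_common_groups_spec : Claim_equal_find_common_groups := by
  intro sentences _
  unfold Spec_find_common_groups find_common_groups find_common_groups_alt
  by_cases h : sentences = []
  · simp [h]
  · rw [if_neg h, if_neg h]
    cases hmin : PySem.List.min? sentences (fun t => PySem.Str.len t) with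
    | none => rfl
    | some shortest =>
      simp only [PySem.Str.len_eq, Int.toNat_natCast]
      exact loops_eq shortest sentences _ 0
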